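-- pv_equiv track=rewrite | github.com/theshovonsaha/shovsOS | orchestration/native_runtime_adapter.py | _provider_from_model
-- ===== SOURCE A (Python) =====
-- from typing import Optional
--
-- def _provider_from_model(raw_model: Optional[str]) -> Optional[str]:
--     if not raw_model:
--         return None
--     lowered = raw_model.lower()
--     known = ("ollama", "openai", "groq", "gemini", "anthropic")
--     for sep in (":", "/"):
--         if sep in lowered:
--             head = lowered.split(sep, 1)[0]
--             if head in known:
--                 return head
--     if lowered in known:
--         return lowered
--     return None
-- ===== SOURCE B (Python) =====
-- from typing import Optional
--
-- def _provider_from_model(raw_model: Optional[str]) -> Optional[str]: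
--     if not raw_model:
--         return None
--     lowered = raw_model.lower()
--     for provider in ("ollama", "openai", "groq", "gemini", "anthropic"):
--         if (lowered == provider
--                 or lowered.startswith(provider + ":")
--                 or lowered.startswith(provider + "/")):
--             return provider
--     return None
-- ===== Notes on version B (the rewrite author's own statement) =====
-- stated objective: simpler
-- what changed: Instead of splitting the lowercased string on each separator and looking the head up in the provider tuple, B iterates over the provider table once, testing equality with the provider or a prefix consisting of the provider followed by a colon or slash, and returns the first provider that matches.
import Mathlib
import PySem

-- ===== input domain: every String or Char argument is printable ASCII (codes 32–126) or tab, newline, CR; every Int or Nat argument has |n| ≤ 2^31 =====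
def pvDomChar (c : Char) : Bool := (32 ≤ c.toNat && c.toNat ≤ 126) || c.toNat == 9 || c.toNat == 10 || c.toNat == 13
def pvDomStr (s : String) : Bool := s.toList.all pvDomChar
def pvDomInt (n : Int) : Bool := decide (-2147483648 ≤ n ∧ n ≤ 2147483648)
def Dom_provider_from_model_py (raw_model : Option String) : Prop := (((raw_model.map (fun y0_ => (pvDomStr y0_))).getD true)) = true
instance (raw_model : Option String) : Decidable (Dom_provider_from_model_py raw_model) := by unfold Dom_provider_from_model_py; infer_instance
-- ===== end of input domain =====

-- B replaces A's split-on-separator-then-table-lookup by a single scan of the provider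
-- table, testing equality with the provider or a prefix of the provider followed by a
-- colon or slash (objective: simpler).

-- ===== PORT A =====
-- the tuple `known` of A
def pvKnown : List String := ["ollama", "openai", "groq", "gemini", "anthropic"]

def provider_from_model_py (raw_model : Option String) : Option String :=
  match raw_model with
  | none => none
  | some raw =>
    if raw = "" then none
    else
      let lowered := PySem.Str.lower raw
      -- `for sep in (":", "/"): …` with early return, as a fold carrying the returned value
      let loop : Option String := [":", "/"].foldl (fun (acc : Option String) (sep : String) =>
        match acc with
        | some r => some r
        | none =>
          if PySem.Str.isIn sep lowered then
            let head := ((PySem.Str.splitMax? lowered sep 1).getD []).headD ""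
            if head ∈ pvKnown then some head else none
          else none) none
      match loop with
      | some r => some r
      | none => if lowered ∈ pvKnown then some lowered else none

-- ===== PORT B =====
def provider_from_model_py_alt (raw_model : Option String) : Option String :=
  match raw_model with
  | none => none
  | some raw =>
    if raw = "" then none
    else
      let lowered := PySem.Str.lower raw
      ["ollama", "openai", "groq", "gemini", "anthropic"].find? (fun p =>
        lowered == p || PySem.Str.startswith lowered (p ++ ":")
          || PySem.Str.startswith lowered (p ++ "/"))

-- ===== PRECONDITION & SPEC =====
def Spec_provider_from_model_py (raw_model : Option String) (out : Option String) : Prop := out = provider_from_model_py_alt raw_model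
instance (raw_model : Option String) (out : Option String) : Decidable (Spec_provider_from_model_py raw_model out) := by unfold Spec_provider_from_model_py; infer_instance

-- ===== CLAIM (what is proved, stated in full; the proofs are below) =====
def Claim_equal_provider_from_model_py : Prop := ∀ (raw_model : Option String), Dom_provider_from_model_py raw_model → Spec_provider_from_model_py raw_model (provider_from_model_py raw_model)

-- ===== LEMMAS AND PROOFS =====

-- the provider table on the char-list side
def pvKc : List (List Char) :=
  ["ollama".toList, "openai".toList, "groq".toList, "gemini".toList, "anthropic".toList]

-- B's per-provider test, on the char-list side
def pvPb (l p : List Char) : Bool :=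
  (l == p) || (p ++ [':']).isPrefixOf l || (p ++ ['/']).isPrefixOf l

theorem pvKc_no_sep : ∀ p ∈ pvKc, ':' ∉ p ∧ '/' ∉ p := by decide

theorem pvKc_no_prefix : ∀ p ∈ pvKc, ∀ q ∈ pvKc, p <+: q → p = q := by decide

theorem pv_go_zero (c : Char) (fuel : Nat) (l cur : List Char) (acc : List (List Char)) :
    PySem.Chars.splitOnMax.go [c] fuel 0 l cur acc = ((cur.reverse ++ l) :: acc).reverse := by
  cases fuel with
  | zero => simp [PySem.Chars.splitOnMax.go]
  | succ f => cases l with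
    | nil => simp [PySem.Chars.splitOnMax.go]
    | cons a r => simp [PySem.Chars.splitOnMax.go]

theorem pv_go_one (c : Char) (l : List Char) : ∀ (fuel : Nat) (cur : List Char) (acc : List (List Char)),
    c ∈ l → l.length ≤ fuel →
    PySem.Chars.splitOnMax.go [c] fuel 1 l cur acc =
      acc.reverse ++ [cur.reverse ++ l.takeWhile (fun x => x != c), (l.dropWhile (fun x => x != c)).tail] := by
  induction l with
  | nil => intro _ _ _ h; simp at h
  | cons a r ih =>
    intro fuel cur acc hmem hf
    cases fuel with
    | zero => simp at hf
    | succ f =>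
      by_cases hac : a = c
      · subst hac
        simp [PySem.Chars.splitOnMax.go, pv_go_zero]
      · have hcr : c ∈ r := by cases hmem with
          | head => exact absurd rfl hac
          | tail _ h => exact h
        have hstep : PySem.Chars.splitOnMax.go [c] (f+1) 1 (a :: r) cur acc =
            PySem.Chars.splitOnMax.go [c] f 1 r (a :: cur) acc := by
          simp [PySem.Chars.splitOnMax.go, List.isPrefixOf]
          intro h; exact absurd h.symm hac
        rw [hstep, ih f (a :: cur) acc hcr (by simpa using hf)]
        simp [hac]

-- split(sep, 1)[0] for a one-char separator that occurs in the string is the prefix before it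
theorem pv_head_eq (t sep : String) (c : Char) (hs : sep.toList = [c]) (hc : c ∈ t.toList) :
    (((PySem.Str.splitMax? t sep 1).getD []).headD "").toList
      = t.toList.takeWhile (fun x => x != c) := by
  have hmap := PySem.Str.splitMax?_map t sep 1
  rw [hs] at hmap
  have hch : PySem.Chars.splitMax? t.toList [c] 1
      = some [t.toList.takeWhile (fun x => x != c), (t.toList.dropWhile (fun x => x != c)).tail] := by
    unfold PySem.Chars.splitMax?
    rw [if_neg (by simp)]
    unfold PySem.Chars.splitOnMax
    rw [if_neg (by norm_num)]
    rw [show Int.toNat 1 = 1 from rfl, pv_go_one c t.toList (t.toList.length + 1) [] [] hc (by omega)]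
    simp
  rw [hch] at hmap
  cases hsp : PySem.Str.splitMax? t sep 1 with
  | none => rw [hsp] at hmap; simp at hmap
  | some ps =>
    rw [hsp] at hmap
    simp only [Option.map_some, Option.some.injEq] at hmap
    cases ps with
    | nil => simp at hmap
    | cons x rest =>
      simp only [List.map_cons, List.cons.injEq] at hmap
      simp [hmap.1]

theorem pv_mem_pvKnown_iff (h : String) : h ∈ pvKnown ↔ h.toList ∈ pvKc := by
  simp [pvKnown, pvKc, ← String.toList_inj]

theorem pv_takeWhile_of_prefix {l p : List Char} {c : Char} (hcp : c ∉ p)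
    (h : p ++ [c] <+: l) : l.takeWhile (fun x => x != c) = p := by
  obtain ⟨r, hr⟩ := h
  subst hr
  rw [List.append_assoc, List.takeWhile_append]
  have htp : List.takeWhile (fun x => x != c) p = p :=
    List.takeWhile_eq_self_iff.mpr (fun x hx => by
      simp only [bne_iff_ne, ne_eq]
      exact fun he => hcp (he ▸ hx))
  rw [htp]
  simp

theorem pv_takeWhile_prefix_self {l : List Char} {c : Char} (hc : c ∈ l) :
    l.takeWhile (fun x => x != c) ++ [c] <+: l := by
  induction l with
  | nil => simp at hc
  | cons a r ih =>
    by_cases hac : a = c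
    · subst hac; simp
    · have hcr : c ∈ r := by cases hc with
        | head => exact absurd rfl hac
        | tail _ h => exact h
      simp only [List.takeWhile_cons, bne_iff_ne, ne_eq, hac, not_false_eq_true,
        if_true, List.cons_append]
      exact List.cons_prefix_cons.mpr ⟨rfl, ih hcr⟩

theorem pv_find?_unique {α : Type} {P : α → Bool} {K : List α} {h : α} (hmem : h ∈ K)
    (hP : P h = true) (huniq : ∀ q ∈ K, P q = true → q = h) : K.find? P = some h := by
  induction K with
  | nil => simp at hmem
  | cons k rest ih =>
    by_cases hk : P k = true
    · rw [List.find?_cons_of_pos hk, huniq k List.mem_cons_self hk]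
    · rw [List.find?_cons_of_neg hk]
      have hne : h ≠ k := fun he => hk (he ▸ hP)
      have : h ∈ rest := by cases hmem with
        | head => exact absurd rfl hne
        | tail _ hm => exact hm
      exact ih this (fun q hq hPq => huniq q (List.mem_cons_of_mem k hq) hPq)

-- the char-list-level statement of A's result (explicit case tree) versus B's find?
theorem pv_core (l : List Char) :
    (if ':' ∈ l ∧ l.takeWhile (fun x => x != ':') ∈ pvKc then
      some (l.takeWhile (fun x => x != ':'))
    else if '/' ∈ l ∧ l.takeWhile (fun x => x != '/') ∈ pvKc then
      some (l.takeWhile (fun x => x != '/'))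
    else if l ∈ pvKc then some l else none) = pvKc.find? (pvPb l) := by
  by_cases h1 : ':' ∈ l ∧ l.takeWhile (fun x => x != ':') ∈ pvKc
  · rw [if_pos h1]
    refine (pv_find?_unique h1.2 ?_ ?_).symm
    · unfold pvPb
      simp only [Bool.or_eq_true, List.isPrefixOf_iff_prefix]
      exact Or.inl (Or.inr (pv_takeWhile_prefix_self h1.1))
    · intro q hq hPq
      unfold pvPb at hPq
      simp only [Bool.or_eq_true, beq_iff_eq, List.isPrefixOf_iff_prefix] at hPq
      rcases hPq with (he | hp) | hp
      · exact absurd (he ▸ h1.1) (pvKc_no_sep q hq).1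
      · exact (pv_takeWhile_of_prefix (pvKc_no_sep q hq).1 hp).symm
      · -- q++['/'] <+: l: q and the ':'-head are both prefixes of l, both in the table
        have hql : q <+: l := (List.prefix_append q ['/']).trans hp
        have hhl : l.takeWhile (fun x => x != ':') <+: l :=
          (List.prefix_append _ [':']).trans (pv_takeWhile_prefix_self h1.1)
        rcases List.prefix_or_prefix_of_prefix hql hhl with h | h
        · exact pvKc_no_prefix q hq _ h1.2 h
        · exact (pvKc_no_prefix _ h1.2 q hq h).symm
  · rw [if_neg h1]
    by_cases h2 : '/' ∈ l ∧ l.takeWhile (fun x => x != '/') ∈ pvKc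
    · rw [if_pos h2]
      refine (pv_find?_unique h2.2 ?_ ?_).symm
      · unfold pvPb
        simp only [Bool.or_eq_true, List.isPrefixOf_iff_prefix]
        exact Or.inr (pv_takeWhile_prefix_self h2.1)
      · intro q hq hPq
        unfold pvPb at hPq
        simp only [Bool.or_eq_true, beq_iff_eq, List.isPrefixOf_iff_prefix] at hPq
        rcases hPq with (he | hp) | hp
        · exact absurd (he ▸ h2.1) (pvKc_no_sep q hq).2
        · have hcl : ':' ∈ l := by
            obtain ⟨r, hr⟩ := hp
            rw [← hr]; simp
          have := pv_takeWhile_of_prefix (pvKc_no_sep q hq).1 hp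
          exact absurd ⟨hcl, this ▸ hq⟩ h1
        · exact (pv_takeWhile_of_prefix (pvKc_no_sep q hq).2 hp).symm
    · rw [if_neg h2]
      by_cases h3 : l ∈ pvKc
      · rw [if_pos h3]
        refine (pv_find?_unique h3 ?_ ?_).symm
        · unfold pvPb; simp
        · intro q hq hPq
          unfold pvPb at hPq
          simp only [Bool.or_eq_true, beq_iff_eq, List.isPrefixOf_iff_prefix] at hPq
          rcases hPq with (he | hp) | hp
          · exact he.symm
          · obtain ⟨r, hr⟩ := hp
            exact absurd (by rw [← hr]; simp) (pvKc_no_sep l h3).1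
          · obtain ⟨r, hr⟩ := hp
            exact absurd (by rw [← hr]; simp) (pvKc_no_sep l h3).2
      · rw [if_neg h3]
        symm
        rw [List.find?_eq_none]
        intro q hq hPq
        unfold pvPb at hPq
        simp only [Bool.or_eq_true, beq_iff_eq, List.isPrefixOf_iff_prefix] at hPq
        rcases hPq with (he | hp) | hp
        · exact h3 (he ▸ hq)
        · have hcl : ':' ∈ l := by obtain ⟨r, hr⟩ := hp; rw [← hr]; simp
          exact h1 ⟨hcl, (pv_takeWhile_of_prefix (pvKc_no_sep q hq).1 hp) ▸ hq⟩
        · have hcl : '/' ∈ l := by obtain ⟨r, hr⟩ := hp; rw [← hr]; simp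
          exact h2 ⟨hcl, (pv_takeWhile_of_prefix (pvKc_no_sep q hq).2 hp) ▸ hq⟩

theorem pv_isIn_true {t : String} {c : Char} (sep : String) (hs : sep.toList = [c])
    (h : c ∈ t.toList) : PySem.Str.isIn sep t = true := by
  rw [PySem.Str.isIn_eq, hs, PySem.Chars.isIn_iff_infix]
  exact (List.singleton_infix_iff c t.toList).mpr h

theorem pv_isIn_false {t : String} {c : Char} (sep : String) (hs : sep.toList = [c])
    (h : c ∉ t.toList) : PySem.Str.isIn sep t = false := by
  rw [PySem.Str.isIn_eq, hs, PySem.Chars.isIn_eq_false_iff]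
  exact fun hi => h ((List.singleton_infix_iff c t.toList).mp hi)

-- B's string-level find? equals the char-list-level find?, mapped back through String.ofList
theorem pv_findB_bridge (t : String) :
    (["ollama", "openai", "groq", "gemini", "anthropic"].find? (fun p =>
        t == p || PySem.Str.startswith t (p ++ ":") || PySem.Str.startswith t (p ++ "/")))
      = (pvKc.find? (pvPb t.toList)).map String.ofList := by
  have hb : ∀ (p : String), (t == p || PySem.Str.startswith t (p ++ ":")
      || PySem.Str.startswith t (p ++ "/")) = pvPb t.toList p.toList := by
    intro p
    unfold pvPb
    have e1 : (t == p) = (t.toList == p.toList) := by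
      rw [Bool.eq_iff_iff]
      simp [String.toList_inj]
    have e2 : PySem.Str.startswith t (p ++ ":") = (p.toList ++ [':']).isPrefixOf t.toList := by
      rw [PySem.Str.startswith_eq, show (p ++ ":").toList = p.toList ++ [':'] from by simp]
      rfl
    have e3 : PySem.Str.startswith t (p ++ "/") = (p.toList ++ ['/']).isPrefixOf t.toList := by
      rw [PySem.Str.startswith_eq, show (p ++ "/").toList = p.toList ++ ['/'] from by simp]
      rfl
    rw [e1, e2, e3]
  simp only [pvKc, List.find?, hb]
  rcases hB1 : pvPb t.toList "ollama".toList <;>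
    rcases hB2 : pvPb t.toList "openai".toList <;>
      rcases hB3 : pvPb t.toList "groq".toList <;>
        rcases hB4 : pvPb t.toList "gemini".toList <;>
          rcases hB5 : pvPb t.toList "anthropic".toList <;>
            simp

theorem pv_main (raw : String) (h : ¬ raw = "") :
    provider_from_model_py (some raw) = provider_from_model_py_alt (some raw) := by
  unfold provider_from_model_py provider_from_model_py_alt
  simp only [if_neg h]
  rw [pv_findB_bridge (PySem.Str.lower raw), ← pv_core (PySem.Str.lower raw).toList]
  set t := PySem.Str.lower raw with ht
  simp only [List.foldl]
  by_cases h1 : ':' ∈ t.toList ∧ t.toList.takeWhile (fun x => x != ':') ∈ pvKc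
  · rw [if_pos h1]
    have hin := pv_isIn_true (t := t) ":" (by decide) h1.1
    have hhead := pv_head_eq t ":" ':' (by decide) h1.1
    simp only [hin, if_true]
    rw [if_pos ((pv_mem_pvKnown_iff _).mpr (hhead ▸ h1.2))]
    have hv : ((PySem.Str.splitMax? t ":" 1).getD []).headD ""
        = String.ofList (t.toList.takeWhile (fun x => x != ':')) := by
      rw [← hhead, String.ofList_toList]
    rw [hv]
    simp
  · rw [if_neg h1]
    have hA1 : (if PySem.Str.isIn ":" t = true then
        if ((PySem.Str.splitMax? t ":" 1).getD []).headD "" ∈ pvKnown then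
          some (((PySem.Str.splitMax? t ":" 1).getD []).headD "") else none
        else none) = none := by
      by_cases hc : ':' ∈ t.toList
      · have hhead := pv_head_eq t ":" ':' (by decide) hc
        have : ((PySem.Str.splitMax? t ":" 1).getD []).headD "" ∉ pvKnown := by
          rw [pv_mem_pvKnown_iff, hhead]
          exact fun hk => h1 ⟨hc, hk⟩
        rw [if_pos (pv_isIn_true (t := t) ":" (by decide) hc), if_neg this]
      · rw [if_neg (by rw [pv_isIn_false (t := t) ":" (by decide) hc]; simp)]
    rw [hA1]
    by_cases h2 : '/' ∈ t.toList ∧ t.toList.takeWhile (fun x => x != '/') ∈ pvKc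
    · rw [if_pos h2]
      have hin := pv_isIn_true (t := t) "/" (by decide) h2.1
      have hhead := pv_head_eq t "/" '/' (by decide) h2.1
      simp only [hin, if_true]
      rw [if_pos ((pv_mem_pvKnown_iff _).mpr (hhead ▸ h2.2))]
      have hv : ((PySem.Str.splitMax? t "/" 1).getD []).headD ""
          = String.ofList (t.toList.takeWhile (fun x => x != '/')) := by
        rw [← hhead, String.ofList_toList]
      rw [hv]
      simp
    · rw [if_neg h2]
      have hA2 : (if PySem.Str.isIn "/" t = true then
          if ((PySem.Str.splitMax? t "/" 1).getD []).headD "" ∈ pvKnown then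
            some (((PySem.Str.splitMax? t "/" 1).getD []).headD "") else none
          else none) = none := by
        by_cases hc : '/' ∈ t.toList
        · have hhead := pv_head_eq t "/" '/' (by decide) hc
          have : ((PySem.Str.splitMax? t "/" 1).getD []).headD "" ∉ pvKnown := by
            rw [pv_mem_pvKnown_iff, hhead]
            exact fun hk => h2 ⟨hc, hk⟩
          rw [if_pos (pv_isIn_true (t := t) "/" (by decide) hc), if_neg this]
        · rw [if_neg (by rw [pv_isIn_false (t := t) "/" (by decide) hc]; simp)]
      rw [hA2]
      by_cases h3 : t ∈ pvKnown
      · rw [if_pos h3, if_pos ((pv_mem_pvKnown_iff t).mp h3)]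
        simp
      · rw [if_neg h3, if_neg (fun hk => h3 ((pv_mem_pvKnown_iff t).mpr hk))]
        rfl

-- ===== VERDICT (by name: the statement is the Claim_ definition above) =====
theorem provider_from_model_py_spec : Claim_equal_provider_from_model_py := by
  intro raw_model _
  unfold Spec_provider_from_model_py
  match raw_model with
  | none => rfl
  | some raw =>
    by_cases h : raw = ""
    · subst h; rfl
    · exact pv_main raw h
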